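-- pv_equiv track=rewrite | github.com/gmarinkovic/python3-lists | linearna_funkcija_nadvelikim_brojevima.py | pomnozi
-- ===== SOURCE A (Python) =====
-- def normalizuj(c):
--     n = len(c)
--     for k in range(n - 1):
--         c[k + 1] += c[k] // 10
--         c[k] %= 10
--     if c[n - 1] == 0:
--         del c[n - 1]
--
-- def pomnozi(a, b):
--     na = len(a);
--     nb = len(b)
--     n = na + nb
--     c = [0] * n
--     for i in range(na):
--         for j in range(nb):
--             c[i + j] += a[i] * b[j]
--     normalizuj(c)
--     return c
-- ===== SOURCE B (Python) =====
-- def pomnozi(a, b):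
--     # value-level multiply: Horner-pack both lists into one big int each,
--     # multiply once, then unpack len(a)+len(b)-1 low digits plus a remainder.
--     x = 0
--     for d in reversed(a):
--         x = x * 10 + d
--     y = 0
--     for d in reversed(b):
--         y = y * 10 + d
--     p = x * y
--     c = []
--     for _ in range(len(a) + len(b) - 1):
--         p, d = divmod(p, 10)
--         c.append(d)
--     if p != 0:
--         c.append(p)
--     return c
-- ===== Notes on version B (the rewrite author's own statement) =====
-- stated objective: faster
-- what changed: Replaces the O(na*nb) digit-by-digit convolution plus carry loop with one big-integer multiply (Horner-pack each list into an int, multiply once, then unpack na+nb-1 low digits via divmod and append the nonzero remainder).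
import Mathlib
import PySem

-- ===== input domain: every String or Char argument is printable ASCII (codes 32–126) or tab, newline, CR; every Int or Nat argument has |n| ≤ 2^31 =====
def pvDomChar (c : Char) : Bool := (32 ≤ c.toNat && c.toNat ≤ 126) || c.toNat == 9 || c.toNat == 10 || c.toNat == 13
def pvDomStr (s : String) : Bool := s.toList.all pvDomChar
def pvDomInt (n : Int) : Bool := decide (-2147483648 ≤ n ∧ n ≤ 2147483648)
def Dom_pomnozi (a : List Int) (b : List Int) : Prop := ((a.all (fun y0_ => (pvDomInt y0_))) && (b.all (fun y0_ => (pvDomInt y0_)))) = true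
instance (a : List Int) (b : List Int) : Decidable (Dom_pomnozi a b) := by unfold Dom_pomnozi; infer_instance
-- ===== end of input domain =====

-- B replaces the digit-by-digit convolution with one big-integer multiply (Horner pack,
-- multiply, unpack n-1 low digits plus remainder); equivalence is about return values only.

-- ===== PORT A =====
-- literal port of A: range(k) over nonnegative k is List.range k; in-range nonnegative
-- Python indexing c[i] is getD i 0 / set i (exact here); '//' and '%' are PySem floordiv/mod.
def normalizuj (c : List Int) : List Int :=
  let n := c.length
  let c1 := (List.range (n - 1)).foldl (fun c k =>
    let c' := c.set (k + 1) (c.getD (k + 1) 0 + PySem.Int.floordiv (c.getD k 0) 10)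
    c'.set k (PySem.Int.mod (c'.getD k 0) 10)) c
  -- del c[n-1] when c[n-1] == 0
  if c1.getD (n - 1) 0 = 0 then c1.take (n - 1) else c1

def pomnozi (a : List Int) (b : List Int) : List Int :=
  let na := a.length
  let nb := b.length
  let n := na + nb
  let c0 := List.replicate n (0 : Int)
  let c1 := (List.range na).foldl (fun c i =>
    (List.range nb).foldl (fun c j =>
      c.set (i + j) (c.getD (i + j) 0 + a.getD i 0 * b.getD j 0)) c) c0
  normalizuj c1

-- ===== PORT B =====
def pomnozi_alt (a : List Int) (b : List Int) : List Int :=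
  let x := a.reverse.foldl (fun acc d => acc * 10 + d) 0
  let y := b.reverse.foldl (fun acc d => acc * 10 + d) 0
  let s := (List.range (a.length + b.length - 1)).foldl
    (fun (s : Int × List Int) _ =>
      (PySem.Int.floordiv s.1 10, s.2 ++ [PySem.Int.mod s.1 10])) (x * y, [])
  if s.1 ≠ 0 then s.2 ++ [s.1] else s.2

-- ===== PRECONDITION & SPEC =====
-- Pre_ excludes only a = [] ∧ b = [], on which A raises IndexError (c[-1] on the empty list).
def Pre_pomnozi (a : List Int) (b : List Int) : Prop := a ≠ [] ∨ b ≠ []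
instance (a : List Int) (b : List Int) : Decidable (Pre_pomnozi a b) := by unfold Pre_pomnozi; infer_instance
def pvWitness_pomnozi : List Int × List Int := ([1, 2], [3])

def Spec_pomnozi (a : List Int) (b : List Int) (out : List Int) : Prop := out = pomnozi_alt a b
instance (a : List Int) (b : List Int) (out : List Int) : Decidable (Spec_pomnozi a b out) := by unfold Spec_pomnozi; infer_instance

-- ===== CLAIM (what is proved, stated in full; the proofs are below) =====
def Claim_equal_pomnozi : Prop := ∀ (a : List Int) (b : List Int), Dom_pomnozi a b → Pre_pomnozi a b → Spec_pomnozi a b (pomnozi a b)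

-- ===== LEMMAS AND PROOFS =====

-- the base-10 value of a little-endian digit list
def pvVal (c : List Int) : Int := c.foldr (fun d acc => d + 10 * acc) 0

-- the low m digits of the base-10 floor expansion of v
def pvDgts (v : Int) (m : Nat) : List Int := (List.range m).map (fun k => v / 10 ^ k % 10)

@[simp] theorem pvVal_nil : pvVal [] = 0 := rfl
@[simp] theorem pvVal_cons (d : Int) (c : List Int) : pvVal (d :: c) = d + 10 * pvVal c := rfl

theorem pvVal_replicate (n : Nat) : pvVal (List.replicate n 0) = 0 := by
  induction n with
  | zero => rfl
  | succ n ih => simp [List.replicate_succ, ih]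

theorem pvVal_eq_sum (c : List Int) :
    pvVal c = ∑ k ∈ Finset.range c.length, c.getD k 0 * 10 ^ k := by
  induction c with
  | nil => simp
  | cons d c ih =>
    rw [pvVal_cons, ih, List.length_cons, Finset.sum_range_succ']
    have h : ∀ i ∈ Finset.range c.length,
        (d :: c).getD (i + 1) 0 * 10 ^ (i + 1) = 10 * (c.getD i 0 * 10 ^ i) := by
      intro i _; rw [List.getD_cons_succ]; ring
    rw [Finset.sum_congr rfl h, ← Finset.mul_sum, List.getD_cons_zero]
    ring

theorem pvVal_set_add (c : List Int) (p : Nat) (x : Int) (hp : p < c.length) :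
    pvVal (c.set p (c.getD p 0 + x)) = pvVal c + x * 10 ^ p := by
  induction c generalizing p with
  | nil => simp at hp
  | cons d c ih =>
    cases p with
    | zero => simp [List.set]; ring
    | succ p =>
      simp only [List.set, List.getD_cons_succ, pvVal_cons]
      rw [ih p (by simpa using hp)]
      ring

theorem foldl_len {β : Type} (f : List Int → β → List Int)
    (h : ∀ c k, (f c k).length = c.length) :
    ∀ (ks : List β) (c : List Int), (ks.foldl f c).length = c.length := by
  intro ks
  induction ks with
  | nil => intro c; rfl
  | cons k ks ih => intro c; rw [List.foldl_cons, ih, h]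

-- inner convolution loop adds t * Σ_{j<m} b_j 10^(i+j) to the value
theorem inner_conv (b : List Int) (t : Int) (i : Nat) :
    ∀ (m : Nat) (c : List Int), i + m ≤ c.length →
      pvVal ((List.range m).foldl (fun c j => c.set (i + j) (c.getD (i + j) 0 + t * b.getD j 0)) c)
        = pvVal c + t * ∑ j ∈ Finset.range m, b.getD j 0 * 10 ^ (i + j) := by
  intro m
  induction m with
  | zero => intro c _; simp
  | succ m ih =>
    intro c h
    rw [List.range_succ, List.foldl_append, List.foldl_cons, List.foldl_nil]
    have hlen : ((List.range m).foldl
        (fun c j => c.set (i + j) (c.getD (i + j) 0 + t * b.getD j 0)) c).length = c.length :=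
      foldl_len _ (fun c j => List.length_set) _ c
    rw [pvVal_set_add _ _ _ (by omega)]
    rw [ih c (by omega), Finset.sum_range_succ]
    ring

theorem outer_conv (a b : List Int) :
    ∀ (m : Nat) (c : List Int), m + b.length ≤ c.length →
      pvVal ((List.range m).foldl (fun c i =>
          (List.range b.length).foldl (fun c j =>
            c.set (i + j) (c.getD (i + j) 0 + a.getD i 0 * b.getD j 0)) c) c)
        = pvVal c + (∑ i ∈ Finset.range m, a.getD i 0 * 10 ^ i) * pvVal b := by
  intro m
  induction m with
  | zero => intro c _; simp
  | succ m ih =>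
    intro c h
    rw [List.range_succ, List.foldl_append, List.foldl_cons, List.foldl_nil]
    have hlen : ((List.range m).foldl (fun c i =>
        (List.range b.length).foldl (fun c j =>
          c.set (i + j) (c.getD (i + j) 0 + a.getD i 0 * b.getD j 0)) c) c).length = c.length :=
      foldl_len _ (fun c i => foldl_len _ (fun c j => List.length_set) _ c) _ c
    rw [inner_conv b (a.getD m 0) m b.length _ (by omega)]
    rw [ih c (by omega), Finset.sum_range_succ]
    have hb : ∑ j ∈ Finset.range b.length, b.getD j 0 * 10 ^ (m + j) = 10 ^ m * pvVal b := by
      rw [pvVal_eq_sum, Finset.mul_sum]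
      refine Finset.sum_congr rfl fun j _ => ?_
      rw [pow_add]; ring
    rw [hb]; ring

-- the recursive form of normalizuj's carry loop (head carried explicitly)
def pvGoAux : Int → List Int → List Int
  | x, [] => [x]
  | x, x1 :: r => PySem.Int.mod x 10 :: pvGoAux (x1 + PySem.Int.floordiv x 10) r

-- the carry step touches only positions k and k+1, so on a cons it shifts down
theorem norm_step_shift (d : Int) (c : List Int) (ks : List Nat) :
    (ks.map Nat.succ).foldl (fun c k =>
        let c' := c.set (k + 1) (c.getD (k + 1) 0 + PySem.Int.floordiv (c.getD k 0) 10)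
        c'.set k (PySem.Int.mod (c'.getD k 0) 10)) (d :: c)
      = d :: ks.foldl (fun c k =>
          let c' := c.set (k + 1) (c.getD (k + 1) 0 + PySem.Int.floordiv (c.getD k 0) 10)
          c'.set k (PySem.Int.mod (c'.getD k 0) 10)) c := by
  induction ks generalizing c with
  | nil => rfl
  | cons k ks ih =>
    simp only [List.map_cons, List.foldl_cons, Nat.succ_eq_add_one, List.getD_cons_succ,
      List.set_cons_succ]
    rw [ih]

theorem fold_eq_goAux :
    ∀ (r : List Int) (x : Int),
      (List.range r.length).foldl (fun c k =>
          let c' := c.set (k + 1) (c.getD (k + 1) 0 + PySem.Int.floordiv (c.getD k 0) 10)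
          c'.set k (PySem.Int.mod (c'.getD k 0) 10)) (x :: r) = pvGoAux x r := by
  intro r
  induction r with
  | nil => intro x; rfl
  | cons x1 r ih =>
    intro x
    rw [List.length_cons, List.range_succ_eq_map, List.foldl_cons]
    simp only [List.getD_cons_succ, List.getD_cons_zero, List.set_cons_succ, List.set_cons_zero]
    rw [norm_step_shift, ih]
    rfl

theorem pvDgts_succ (v : Int) (m : Nat) : pvDgts v (m + 1) = v % 10 :: pvDgts (v / 10) m := by
  unfold pvDgts
  rw [List.range_succ_eq_map, List.map_cons, List.map_map]
  congr 1
  · simp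
  · refine List.map_congr_left fun k _ => ?_
    simp only [Function.comp_apply, Nat.succ_eq_add_one]
    rw [pow_succ', ← Int.ediv_ediv_of_nonneg (by norm_num : (0:Int) ≤ 10)]

theorem pvDgts_snoc (v : Int) (m : Nat) : pvDgts v (m + 1) = pvDgts v m ++ [v / 10 ^ m % 10] := by
  unfold pvDgts
  rw [List.range_succ, List.map_append]
  rfl

theorem pvGoAux_closed :
    ∀ (r : List Int) (x : Int),
      pvGoAux x r = pvDgts (pvVal (x :: r)) r.length ++ [pvVal (x :: r) / 10 ^ r.length] := by
  intro r
  induction r with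
  | nil => intro x; simp [pvGoAux, pvDgts]
  | cons x1 r ih =>
    intro x
    have h10 : (0:Int) < 10 := by norm_num
    simp only [pvGoAux]
    rw [ih]
    have hv : pvVal ((x1 + PySem.Int.floordiv x 10) :: r) = pvVal (x :: x1 :: r) / 10 := by
      rw [PySem.Int.floordiv_eq_ediv_of_pos h10]
      simp only [pvVal_cons]
      rw [Int.add_mul_ediv_left _ _ (by norm_num : (10:Int) ≠ 0)]
      ring
    have hm : PySem.Int.mod x 10 = pvVal (x :: x1 :: r) % 10 := by
      rw [PySem.Int.mod_eq_emod_of_pos h10]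
      simp only [pvVal_cons]
      rw [Int.add_mul_emod_self_left]
    rw [hv, hm, List.length_cons, pvDgts_succ]
    rw [show pvVal (x :: x1 :: r) / 10 / 10 ^ r.length = pvVal (x :: x1 :: r) / 10 ^ (r.length + 1) from by
      rw [pow_succ']
      exact Int.ediv_ediv_of_nonneg (by norm_num)]
    simp

theorem getD_len (L : List Int) (z : Int) (m : Nat) (h : L.length = m) :
    (L ++ [z]).getD m 0 = z := by
  subst h
  induction L with
  | nil => rfl
  | cons d L _ => simp

theorem take_len (L : List Int) (z : Int) (m : Nat) (h : L.length = m) :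
    (L ++ [z]).take m = L := by
  subst h
  exact List.take_left

theorem normalizuj_eq (x : Int) (r : List Int) :
    normalizuj (x :: r) = (if pvVal (x :: r) / 10 ^ r.length = 0
      then pvDgts (pvVal (x :: r)) r.length
      else pvDgts (pvVal (x :: r)) r.length ++ [pvVal (x :: r) / 10 ^ r.length]) := by
  unfold normalizuj
  simp only [List.length_cons, Nat.add_sub_cancel]
  rw [fold_eq_goAux, pvGoAux_closed]
  have hL : (pvDgts (pvVal (x :: r)) r.length).length = r.length := by simp [pvDgts]
  rw [getD_len _ _ _ hL, take_len _ _ _ hL]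

theorem b_loop (m : Nat) (v : Int) :
    (List.range m).foldl (fun (s : Int × List Int) _ =>
        (PySem.Int.floordiv s.1 10, s.2 ++ [PySem.Int.mod s.1 10])) (v, [])
      = (v / 10 ^ m, pvDgts v m) := by
  have h10 : (0:Int) < 10 := by norm_num
  induction m with
  | zero => simp [pvDgts]
  | succ m ih =>
    rw [List.range_succ, List.foldl_append, ih, List.foldl_cons, List.foldl_nil]
    simp only
    rw [PySem.Int.floordiv_eq_ediv_of_pos h10, PySem.Int.mod_eq_emod_of_pos h10, pvDgts_snoc]
    rw [show v / 10 ^ m / 10 = v / 10 ^ (m + 1) from by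
      rw [pow_succ]
      exact Int.ediv_ediv_of_nonneg (by positivity)]

theorem horner_rev (l : List Int) :
    l.reverse.foldl (fun acc d => acc * 10 + d) 0 = pvVal l := by
  rw [List.foldl_reverse]
  induction l with
  | nil => rfl
  | cons d c ih => simp [List.foldr_cons, ih]; ring

theorem main_eq (a b : List Int) (hpre : a ≠ [] ∨ b ≠ []) : pomnozi a b = pomnozi_alt a b := by
  have hn : 0 < a.length + b.length := by
    rcases hpre with h | h
    · have := List.length_pos_of_ne_nil h; omega
    · have := List.length_pos_of_ne_nil h; omega
  simp only [pomnozi, pomnozi_alt]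
  rw [horner_rev, horner_rev, b_loop]
  have key : ∀ (C : List Int), C.length = a.length + b.length →
      pvVal C = pvVal a * pvVal b →
      normalizuj C = (if pvVal a * pvVal b / 10 ^ (a.length + b.length - 1) ≠ 0
        then pvDgts (pvVal a * pvVal b) (a.length + b.length - 1)
          ++ [pvVal a * pvVal b / 10 ^ (a.length + b.length - 1)]
        else pvDgts (pvVal a * pvVal b) (a.length + b.length - 1)) := by
    intro C hlen hval
    cases C with
    | nil => simp at hlen; omega
    | cons x r =>
      have hr : r.length = a.length + b.length - 1 := by
        simp at hlen; omega
      rw [normalizuj_eq, hval, hr]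
      by_cases h : pvVal a * pvVal b / 10 ^ (a.length + b.length - 1) = 0 <;> simp [h]
  refine key _ ?_ ?_
  · exact (foldl_len _ (fun c i => foldl_len _ (fun c j => List.length_set) _ c) _ _).trans
      (by simp)
  · rw [outer_conv a b a.length (List.replicate (a.length + b.length) 0) (by simp)]
    rw [pvVal_replicate, ← pvVal_eq_sum]
    ring

-- ===== VERDICT (by name: the statement is the Claim_ definition above) =====
theorem pomnozi_spec : Claim_equal_pomnozi := by
  intro a b _ hpre
  unfold Spec_pomnozi
  exact main_eq a b hpre
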